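-- pv_equiv track=rewrite | github.com/shahidNkhan/AdventOfCode | Day3/AOC_Day3.py | getIncorrectItem
-- ===== SOURCE A (Python) =====
-- def getIncorrectItem(itemStr):
--     # return the character that is present in both the first and second halves of the string
--     itemSet = set()
--     itemLength = len(itemStr)
--     for index, item in enumerate(itemStr):
--         if index < itemLength / 2:
--             itemSet.add(item)
--         elif item in itemSet:
--             return item
-- ===== SOURCE B (Python) =====
-- def getIncorrectItem(itemStr):
--     # return the character that is present in both the first and second halves of the string
--     # Inverted traversal: for each character of the first half, find its first
--     # occurrence in the second half; answer is the character at the smallest such position.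
--     k = (len(itemStr) + 1) // 2  # A's float test index < len/2 keeps exactly the first ceil(len/2) chars
--     best = -1
--     for c in itemStr[:k]:
--         p = itemStr.find(c, k)
--         if p != -1 and (best == -1 or p < best):
--             best = p
--     if best != -1:
--         return itemStr[best]
-- ===== Notes on version B (the rewrite author's own statement) =====
-- stated objective: alternative
-- what changed: B inverts the traversal: instead of scanning the second half against an incrementally built set of first-half characters, it iterates over the FIRST half, locates each character's first occurrence in the second half with str.find(c, k), and returns the character at the minimal such position.
import Mathlib
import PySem

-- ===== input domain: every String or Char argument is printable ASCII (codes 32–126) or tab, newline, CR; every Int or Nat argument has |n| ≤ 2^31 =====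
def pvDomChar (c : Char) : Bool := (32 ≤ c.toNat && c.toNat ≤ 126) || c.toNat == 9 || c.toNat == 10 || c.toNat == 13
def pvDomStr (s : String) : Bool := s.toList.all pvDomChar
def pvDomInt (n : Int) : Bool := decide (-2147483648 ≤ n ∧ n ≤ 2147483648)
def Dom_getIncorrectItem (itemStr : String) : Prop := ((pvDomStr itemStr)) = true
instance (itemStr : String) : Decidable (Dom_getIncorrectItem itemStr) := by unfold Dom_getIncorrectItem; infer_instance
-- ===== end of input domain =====

-- B inverts the traversal (first half drives the search via str.find on the second half) instead of
-- A's one pass over the whole string with an incrementally built set (objective: alternative).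

-- ===== PORT A =====
-- the for-loop with early return, carrying the running index and the set;
-- 'index < itemLength / 2' (Python true division) is exact as '2 * index < itemLength' since both are integers
def pvGoA : List Char → Nat → Nat → PySem.Set Char → Option Char
  | [], _, _, _ => none
  | c :: rest, i, L, s =>
    if 2 * i < L then pvGoA rest (i + 1) L (PySem.Set.add s c)
    else if PySem.Set.contains s c then some c
    else pvGoA rest (i + 1) L s

def getIncorrectItem (itemStr : String) : Option String :=
  (pvGoA itemStr.toList 0 itemStr.toList.length PySem.Set.empty).map (fun c => String.ofList [c])

-- ===== PORT B =====
-- the for-loop over the first half carrying the running minimum position 'best';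
-- itemStr.find(c, k) is PySem.Chars.findFrom on the char list (single-char needle)
def pvGoB (l : List Char) (k : Nat) : List Char → Int → Int
  | [], best => best
  | c :: rest, best =>
    let p := PySem.Chars.findFrom l [c] (k : Int)
    pvGoB l k rest (if p ≠ -1 ∧ (best = -1 ∨ p < best) then p else best)

def getIncorrectItem_alt (itemStr : String) : Option String :=
  let l := itemStr.toList
  let k := (l.length + 1) / 2
  let best := pvGoB l k (l.take k) (-1)
  if best ≠ -1 then (PySem.List.pyGet? l best).map (fun c => String.ofList [c]) else none

-- ===== PRECONDITION & SPEC =====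
def Spec_getIncorrectItem (itemStr : String) (out : Option String) : Prop := out = getIncorrectItem_alt itemStr
instance (itemStr : String) (out : Option String) : Decidable (Spec_getIncorrectItem itemStr out) := by unfold Spec_getIncorrectItem; infer_instance

-- ===== CLAIM (what is proved, stated in full; the proofs are below) =====
def Claim_equal_getIncorrectItem : Prop := ∀ (itemStr : String), Dom_getIncorrectItem itemStr → Spec_getIncorrectItem itemStr (getIncorrectItem itemStr)

-- ===== LEMMAS AND PROOFS =====

-- once the index has reached the second half, A only tests membership: it is find? over the rest
theorem pvGoA_phase2 (l : List Char) : ∀ (i L : Nat) (s : PySem.Set Char), L ≤ 2 * i →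
    pvGoA l i L s = l.find? (fun c => PySem.Set.contains s c) := by
  induction l with
  | nil => intro i L s _; simp [pvGoA]
  | cons c rest ih =>
    intro i L s h
    simp only [pvGoA, List.find?_cons]
    rw [if_neg (by omega)]
    cases hc : PySem.Set.contains s c <;> simp [ih (i + 1) L s (by omega)]

-- invariant of A's first phase: the set holds exactly the chars of t.take i
theorem pvGoA_main (t : List Char) : ∀ (n i : Nat) (s : PySem.Set Char),
    (t.length + 1) / 2 - i = n → i ≤ (t.length + 1) / 2 →
    (∀ c, c ∈ s ↔ c ∈ t.take i) →
    pvGoA (t.drop i) i t.length s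
      = (t.drop ((t.length + 1) / 2)).find? (fun c => (t.take ((t.length + 1) / 2)).contains c) := by
  intro n
  induction n with
  | zero =>
    intro i s hn hle hmem
    have hik : i = (t.length + 1) / 2 := by omega
    subst hik
    rw [pvGoA_phase2 _ _ _ _ (by omega)]
    congr 1
    funext c
    have := hmem c
    simp only [PySem.Set.contains_eq_listContains]
    simp [this]
  | succ n ih =>
    intro i s hn hle hmem
    have hik : i < (t.length + 1) / 2 := by omega
    have hiL : i < t.length := by omega
    rw [List.drop_eq_getElem_cons hiL]
    simp only [pvGoA]
    rw [if_pos (by omega)]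
    apply ih (i + 1) _ (by omega) (by omega)
    intro c
    rw [PySem.Set.mem_add, hmem c]
    simp only [List.mem_take_iff_getElem]
    constructor
    · rintro (⟨j, hj, rfl⟩ | rfl)
      · exact ⟨j, by omega, rfl⟩
      · exact ⟨i, by omega, rfl⟩
    · rintro ⟨j, hj, rfl⟩
      by_cases hji : j < i
      · exact Or.inl ⟨j, by omega, rfl⟩
      · have hje : j = i := by omega
        subst hje; exact Or.inr rfl

-- [c] is a prefix of xs iff xs starts with c
theorem pvSingleton_prefix (c : Char) (xs : List Char) : ([c] <+: xs) ↔ xs.head? = some c := by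
  cases xs with
  | nil => simp
  | cons a t => simp [List.cons_prefix_cons, eq_comm]

-- str.find of a single character = its first index (as findIdx), or -1 when absent
theorem pvFind_char (S : List Char) (c : Char) :
    PySem.Chars.find S [c] = if c ∈ S then ((S.findIdx (fun x => x == c) : Nat) : Int) else -1 := by
  by_cases hc : c ∈ S
  · rw [if_pos hc]
    have hinf : [c] <:+: S := (List.singleton_infix_iff c S).mpr hc
    have h0 : 0 ≤ PySem.Chars.find S [c] := (PySem.Chars.find_nonneg_iff S [c]).mpr hinf
    obtain ⟨hpre, hmin⟩ := PySem.Chars.find_spec h0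
    set t := (PySem.Chars.find S [c]).toNat with ht
    rw [pvSingleton_prefix, List.head?_drop] at hpre
    have htlt : t < S.length := by
      by_contra h
      simp [List.getElem?_eq_none (by omega : S.length ≤ t)] at hpre
    have hSt : S[t] = c := by
      rw [List.getElem?_eq_getElem htlt] at hpre
      exact Option.some.inj hpre
    have hflt : S.findIdx (fun x => x == c) < S.length :=
      List.findIdx_lt_length.mpr ⟨c, hc, by simp⟩
    have hle1 : S.findIdx (fun x => x == c) ≤ t := by
      by_contra h
      have := List.not_of_lt_findIdx (p := fun x => x == c) (xs := S) (i := t) (by omega)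
      simp at this
      exact this hSt
    have hle2 : t ≤ S.findIdx (fun x => x == c) := by
      by_contra h
      have hj : S.findIdx (fun x => x == c) < t := by omega
      have hmin' := hmin _ hj
      rw [pvSingleton_prefix, List.head?_drop] at hmin'
      have hg : (S[S.findIdx (fun x => x == c)] == c) = true :=
        List.findIdx_getElem (w := hflt)
      simp only [beq_iff_eq] at hg
      rw [List.getElem?_eq_getElem hflt, hg] at hmin'
      exact hmin' rfl
    omega
  · rw [if_neg hc, PySem.Chars.find_eq_neg_one_iff, List.singleton_infix_iff]
    exact hc

-- B's loop result when every first-half character is absent from the second half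
theorem pvGoB_all_neg (l : List Char) (k : Nat) : ∀ (cs : List Char) (best : Int),
    (∀ c ∈ cs, PySem.Chars.findFrom l [c] (k : Int) = -1) → pvGoB l k cs best = best := by
  intro cs
  induction cs with
  | nil => intro best _; rfl
  | cons c rest ih =>
    intro best h
    simp only [pvGoB]
    rw [h c (by simp), if_neg (by simp)]
    exact ih best (fun d hd => h d (by simp [hd]))

-- B's loop computes the minimum attained value v when all values are -1 or ≥ v and v is attained
theorem pvGoB_min (l : List Char) (k : Nat) (v : Int) (hv : 0 ≤ v) : ∀ (cs : List Char) (best : Int),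
    (∀ c ∈ cs, PySem.Chars.findFrom l [c] (k : Int) = -1 ∨ v ≤ PySem.Chars.findFrom l [c] (k : Int)) →
    ((∃ c ∈ cs, PySem.Chars.findFrom l [c] (k : Int) = v) ∨ best = v) →
    (best = -1 ∨ v ≤ best) →
    pvGoB l k cs best = v := by
  intro cs
  induction cs with
  | nil =>
    intro best _ hw _
    rcases hw with ⟨c, hc, _⟩ | rfl
    · exact absurd hc (by simp)
    · rfl
  | cons c rest ih =>
    intro best hall hw hbr
    simp only [pvGoB]
    have hpc : PySem.Chars.findFrom l [c] (k : Int) = -1 ∨ v ≤ PySem.Chars.findFrom l [c] (k : Int) :=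
      hall c (by simp)
    set p := PySem.Chars.findFrom l [c] (k : Int) with hp
    set b' := if p ≠ -1 ∧ (best = -1 ∨ p < best) then p else best with hb'
    have hrange : b' = -1 ∨ v ≤ b' := by
      rw [hb']; split_ifs with h
      · rcases hpc with h1 | h1
        · exact absurd h1 h.1
        · exact Or.inr h1
      · exact hbr
    apply ih b' (fun d hd => hall d (by simp [hd])) _ hrange
    rcases hw with ⟨d, hd, hdv⟩ | rfl
    · rcases List.mem_cons.mp hd with rfl | hd'
      · -- the witness is the head: b' = v
        right
        have hpv : p = v := by rw [hp]; exact hdv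
        rw [hb']
        split_ifs with h
        · exact hpv
        · push_neg at h
          have h2 := h (by omega)
          rcases hbr with h1 | h1 <;> omega
      · exact Or.inl ⟨d, hd', hdv⟩
    · -- best = v already: b' stays v
      right
      rw [hb']
      split_ifs with h
      · rcases hpc with h1 | h1
        · exact absurd h1 h.1
        · rcases h.2 with h2 | h2 <;> omega
      · rfl

-- ===== VERDICT (by name: the statement is the Claim_ definition above) =====
theorem getIncorrectItem_spec : Claim_equal_getIncorrectItem := by
  intro itemStr _
  unfold Spec_getIncorrectItem getIncorrectItem getIncorrectItem_alt
  simp only []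
  set l := itemStr.toList with hl
  set k := (l.length + 1) / 2 with hk
  have hkle : k ≤ l.length := by omega
  have hA := pvGoA_main l k 0 PySem.Set.empty (by omega) (by omega) (by simp [PySem.Set.empty])
  rw [List.drop_zero] at hA
  rw [hA]
  have hf : ∀ c : Char, PySem.Chars.findFrom l [c] (k : Int) =
      if c ∈ l.drop k then (((k + (l.drop k).findIdx (fun x => x == c) : Nat)) : Int) else -1 := by
    intro c
    rw [PySem.Chars.findFrom_natCast l [c] k hkle, pvFind_char]
    by_cases h : c ∈ l.drop k
    · rw [if_pos h, if_pos h, if_neg (by omega)]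
      push_cast; ring
    · rw [if_neg h, if_neg h, if_pos rfl]
  set S := l.drop k with hS
  set F := l.take k with hF
  set N := S.findIdx (fun x => F.contains x) with hN
  have hSlen : S.length = l.length - k := by rw [hS]; simp
  rw [List.find?_eq_getElem?_findIdx]
  by_cases hcase : N < S.length
  · -- a common character exists; its position in S is N
    have hc0 : (F.contains S[N]) = true := List.findIdx_getElem (w := hcase)
    have hc0F : S[N] ∈ F := by simpa using hc0
    have hc0S : S[N] ∈ S := List.getElem_mem hcase
    have hNc : S.findIdx (fun x => x == S[N]) = N := by
      have hlt : S.findIdx (fun x => x == S[N]) < S.length :=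
        List.findIdx_lt_length.mpr ⟨S[N], hc0S, by simp⟩
      have hle1 : S.findIdx (fun x => x == S[N]) ≤ N := by
        by_contra h
        have := List.not_of_lt_findIdx (p := fun x => x == S[N]) (xs := S) (i := N) (by omega)
        simp at this
        exact this rfl
      have hle2 : N ≤ S.findIdx (fun x => x == S[N]) := by
        by_contra h
        have hfalse := List.not_of_lt_findIdx (p := fun x => F.contains x) (xs := S)
          (i := S.findIdx (fun x => x == S[N])) (by omega)
        have hg : S[S.findIdx (fun x => x == S[N])] = S[N] := by
          simpa using List.findIdx_getElem (w := hlt)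
        simp at hfalse
        exact (hg ▸ hfalse) hc0F
      omega
    have hbest : pvGoB l k F (-1) = (((k + N : Nat)) : Int) := by
      apply pvGoB_min l k _ (by positivity) F (-1)
      · intro c hcF
        rw [hf c]
        split_ifs with hcS
        · right
          have hlt : S.findIdx (fun x => x == c) < S.length :=
            List.findIdx_lt_length.mpr ⟨c, hcS, by simp⟩
          have hge : N ≤ S.findIdx (fun x => x == c) := by
            by_contra h
            have hfalse := List.not_of_lt_findIdx (p := fun x => F.contains x) (xs := S)
              (i := S.findIdx (fun x => x == c)) (by omega)
            have hg : S[S.findIdx (fun x => x == c)] = c := by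
              simpa using List.findIdx_getElem (w := hlt)
            simp at hfalse
            exact (hg ▸ hfalse) hcF
          push_cast; omega
        · left; rfl
      · exact Or.inl ⟨S[N], hc0F, by rw [hf, if_pos hc0S, hNc]⟩
      · left; rfl
    rw [hbest, if_pos (by omega)]
    rw [PySem.List.pyGet?_natCast, ← List.getElem?_drop]
  · -- no common character
    have hall : ∀ c ∈ F, PySem.Chars.findFrom l [c] (k : Int) = -1 := by
      intro c hcF
      rw [hf c]
      split_ifs with hcS
      · exfalso
        have hlt : N < S.length := List.findIdx_lt_length.mpr ⟨c, hcS, by simp [hcF]⟩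
        omega
      · rfl
    rw [pvGoB_all_neg l k F (-1) hall, if_neg (by simp)]
    rw [List.getElem?_eq_none (by omega)]
    rfl
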